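-- pv_equiv track=rewrite | github.com/M3galodn81/one-project-per-day | [Day 33] ASCII to Base64/ascii_to_base64.py | ascii_to_b64
-- ===== SOURCE A (Python) =====
-- base64_chars = "ABCDEFGHIJKLMNOPQRSTUVWXYZabcdefghijklmnopqrstuvwxyz0123456789+/"
--
-- def ascii_to_b64(ascii_text):
--     ascii_text = [bin(ord(char)).removeprefix("0b").zfill(8) for char in ascii_text]
--     ascii_text = "".join(ascii_text)
--
--     padding = len(ascii_text) % 6
--     if padding != 0:
--         ascii_text += '0' * (6 - padding)
--
--     sextets = [ascii_text[i:i+6] for i in range(0,len(ascii_text),6)]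
--
--     output = ""
--     for sextet in sextets:
--         output += base64_chars[int(sextet,2)]
--
--     original_length = len(ascii_text) // 8
--     output_padding = "=" * ((3 - (original_length % 3)) % 3)
--     return output + output_padding
-- ===== SOURCE B (Python) =====
-- base64_chars = "ABCDEFGHIJKLMNOPQRSTUVWXYZabcdefghijklmnopqrstuvwxyz0123456789+/"
--
-- def ascii_to_b64(ascii_text):
--     acc = 0
--     bits = 0
--     out = []
--     for char in ascii_text:
--         acc = (acc << 8) | ord(char)
--         bits += 8
--         while bits >= 6:
--             bits -= 6
--             out.append(base64_chars[(acc >> bits) & 63])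
--         acc &= (1 << bits) - 1
--     if bits > 0:
--         out.append(base64_chars[(acc << (6 - bits)) & 63])
--     return "".join(out) + "=" * ((3 - len(ascii_text) % 3) % 3)
-- ===== Notes on version B (the rewrite author's own statement) =====
-- stated objective: faster
-- what changed: Replaces A's two-phase pipeline (build the whole binary-digit string of the input, slice it into sextet substrings, parse each substring back to an int) by a single pass over the bytes with an integer bit accumulator that emits each base64 char as soon as six bits are available; no intermediate bit-string is built and no string-to-int parsing happens, a constant-factor win.
import Mathlib
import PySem

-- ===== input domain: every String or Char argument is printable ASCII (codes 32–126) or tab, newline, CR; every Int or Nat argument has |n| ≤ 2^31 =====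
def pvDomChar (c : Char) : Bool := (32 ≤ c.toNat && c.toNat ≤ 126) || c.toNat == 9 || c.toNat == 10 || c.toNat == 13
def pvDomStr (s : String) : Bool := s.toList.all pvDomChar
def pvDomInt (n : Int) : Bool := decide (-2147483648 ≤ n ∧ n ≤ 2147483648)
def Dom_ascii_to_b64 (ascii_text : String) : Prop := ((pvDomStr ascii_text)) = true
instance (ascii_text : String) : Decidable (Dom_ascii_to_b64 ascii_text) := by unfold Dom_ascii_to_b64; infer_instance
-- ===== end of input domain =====

-- B replaces A's build-the-whole-bit-string-then-slice-into-sextets pipeline by a single pass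
-- with a small integer bit accumulator (objective: alternative decomposition, no string of bits is built).

-- ===== PORT A =====
def pvB64 : List Char := "ABCDEFGHIJKLMNOPQRSTUVWXYZabcdefghijklmnopqrstuvwxyz0123456789+/".toList

-- s.removeprefix(p) (PySem has no removeprefix; exact: drops p iff it is a prefix)
def pvRemoveprefix (cs pre : List Char) : List Char :=
  if cs.take pre.length = pre then cs.drop pre.length else cs

-- bin(ord(char)).removeprefix("0b").zfill(8)
def pvAByte (c : Char) : List Char :=
  PySem.Chars.zfill (pvRemoveprefix (PySem.Int.toBinChars0b ((c.toNat : Int))) ['0', 'b']) 8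

-- base64_chars[int(sextet, 2)]; the none branches are where Python would raise
-- (ValueError / IndexError) — unreachable here: every sextet is a nonempty string of
-- '0'/'1' of length ≤ 6, so int(sextet,2) is a value < 64
def pvASextetChar (sx : List Char) : List Char :=
  match PySem.Int.ofCharsBase? sx 2 with
  | some v =>
    match PySem.List.pyGet? pvB64 v with
    | some ch => [ch]
    | none => []
  | none => []

def ascii_to_b64 (ascii_text : String) : String :=
  let joined : List Char := PySem.Chars.join [] (ascii_text.toList.map pvAByte)
  let padding : Nat := joined.length % 6
  let padded : List Char := if padding ≠ 0 then joined ++ List.replicate (6 - padding) '0' else joined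
  let sextets : List (List Char) :=
    (PySem.List.pyRange 0 ((padded.length : Int)) 6).map
      (fun i => PySem.List.slice padded (some i) (some (i + 6)))
  let output : List Char := sextets.foldl (fun out sx => out ++ pvASextetChar sx) []
  let original_length : Nat := padded.length / 8
  String.ofList (output ++ List.replicate ((3 - original_length % 3) % 3) '=')

-- ===== PORT B =====
-- while bits >= 6: bits -= 6; out.append(base64_chars[(acc >> bits) & 63])
def pvEmit (acc : Nat) (bits : Nat) (out : List Char) : Nat × List Char :=
  if bits ≥ 6 then
    pvEmit acc (bits - 6) (out ++ [pvB64.getD ((acc >>> (bits - 6)) &&& 63) 'A'])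
  else (bits, out)
  termination_by bits
  decreasing_by omega

-- one iteration of B's for-loop; state = (acc, bits, out)
def pvStep (st : Nat × Nat × List Char) (c : Char) : Nat × Nat × List Char :=
  let acc := (st.1 <<< 8) ||| c.toNat
  let r := pvEmit acc (st.2.1 + 8) st.2.2
  (acc &&& ((1 <<< r.1) - 1), r.1, r.2)

-- if bits > 0: out.append(base64_chars[(acc << (6 - bits)) & 63])  (flush of the last partial sextet)
def pvFlush (st : Nat × Nat × List Char) : List Char :=
  if st.2.1 > 0 then st.2.2 ++ [pvB64.getD ((st.1 <<< (6 - st.2.1)) &&& 63) 'A']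
  else st.2.2

def ascii_to_b64_alt (ascii_text : String) : String :=
  let st := ascii_text.toList.foldl pvStep (0, 0, [])
  String.ofList (pvFlush st ++ List.replicate ((3 - ascii_text.toList.length % 3) % 3) '=')

-- ===== PRECONDITION & SPEC =====
def Spec_ascii_to_b64 (ascii_text : String) (out : String) : Prop := out = ascii_to_b64_alt ascii_text
instance (ascii_text : String) (out : String) : Decidable (Spec_ascii_to_b64 ascii_text out) := by unfold Spec_ascii_to_b64; infer_instance

-- ===== CLAIM (what is proved, stated in full; the proofs are below) =====
def Claim_equal_ascii_to_b64 : Prop := ∀ (ascii_text : String), Dom_ascii_to_b64 ascii_text → Spec_ascii_to_b64 ascii_text (ascii_to_b64 ascii_text)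

-- ===== LEMMAS AND PROOFS =====

def bch (k : Nat) : Char := if k % 2 = 1 then '1' else '0'
def byteBits (v : Nat) : List Char :=
  [bch (v/128), bch (v/64), bch (v/32), bch (v/16), bch (v/8), bch (v/4), bch (v/2), bch v]
def sextetBits (y : Nat) : List Char :=
  [bch (y/32), bch (y/16), bch (y/8), bch (y/4), bch (y/2), bch y]

def tbl (y : Nat) : Char := pvB64.getD y 'A'

lemma shl_or (x a i : Nat) (h : a < 2^i) : (x <<< i) ||| a = x * 2^i + a := by
  rw [← Nat.shiftLeft_add_eq_or_of_lt h, Nat.shiftLeft_eq]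

lemma andmod (n i : Nat) : n &&& (2^i - 1) = n % 2^i := Nat.and_two_pow_sub_one_eq_mod n i

lemma emit_sh (acc k : Nat) : (acc >>> k) &&& 63 = acc / 2^k % 64 := by
  rw [Nat.shiftRight_eq_div_pow]
  have h1 := andmod (acc / 2^k) 6
  norm_num at h1; exact h1

lemma step0 (acc : Nat) (out : List Char) (c : Char) (h : c.toNat < 256) :
    pvStep (acc, 0, out) c = (c.toNat % 4, 2, out ++ [tbl (c.toNat / 4)]) := by
  simp only [pvStep]
  norm_num
  rw [shl_or acc c.toNat 8 (by norm_num; omega)]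
  simp [pvEmit, emit_sh]
  norm_num [tbl]
  refine ⟨?_, ?_⟩
  · have h2 := andmod (acc * 256 + c.toNat) 2; norm_num at h2; rw [h2]; omega
  · have h2 : (acc * 256 + c.toNat) / 4 % 64 = c.toNat / 4 := by omega
    rw [h2]

lemma step2 (acc : Nat) (out : List Char) (c : Char) (ha : acc < 4) (h : c.toNat < 256) :
    pvStep (acc, 2, out) c = (c.toNat % 16, 4, out ++ [tbl (acc * 16 + c.toNat / 16)]) := by
  simp only [pvStep]
  norm_num
  rw [shl_or acc c.toNat 8 (by norm_num; omega)]
  simp [pvEmit, emit_sh]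
  norm_num [tbl]
  refine ⟨?_, ?_⟩
  · have h2 := andmod (acc * 256 + c.toNat) 4; norm_num at h2; rw [h2]; omega
  · have h2 : (acc * 256 + c.toNat) / 16 % 64 = acc * 16 + c.toNat / 16 := by omega
    rw [h2]

lemma step4 (acc : Nat) (out : List Char) (c : Char) (ha : acc < 16) (h : c.toNat < 256) :
    pvStep (acc, 4, out) c =
      (0, 0, out ++ [tbl (acc * 4 + c.toNat / 64), tbl (c.toNat % 64)]) := by
  simp only [pvStep]
  norm_num
  rw [shl_or acc c.toNat 8 (by norm_num; omega)]
  simp [pvEmit, emit_sh]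
  norm_num [tbl]
  refine ⟨?_, ?_⟩
  · have h2 : (acc * 256 + c.toNat) / 64 % 64 = acc * 4 + c.toNat / 64 := by omega
    rw [h2]
  · have h2 := andmod (acc * 256 + c.toNat) 6; norm_num at h2; rw [h2]
    have h3 : (acc * 256 + c.toNat) % 64 = c.toNat % 64 := by omega
    rw [h3]

set_option maxRecDepth 4096 in
lemma key256 : ∀ v : Nat, v < 256 →
    PySem.Chars.zfill (pvRemoveprefix (PySem.Int.toBinChars0b ((v : Int))) ['0', 'b']) 8 = byteBits v := by
  decide

lemma byte_eq (c : Char) (h : c.toNat < 256) : pvAByte c = byteBits c.toNat := key256 c.toNat h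

set_option maxRecDepth 8192 in
lemma idx64 : ∀ y : Nat, y < 64 → pvASextetChar (sextetBits y) = [tbl y] := by decide

lemma bch_congr {k1 k2 : Nat} (h : k1 % 2 = k2 % 2) : bch k1 = bch k2 := by
  unfold bch; rw [h]

lemma sext_eq {x1 x2 x3 x4 x5 x6 y : Nat}
    (h1 : x1 % 2 = y/32 % 2) (h2 : x2 % 2 = y/16 % 2) (h3 : x3 % 2 = y/8 % 2)
    (h4 : x4 % 2 = y/4 % 2) (h5 : x5 % 2 = y/2 % 2) (h6 : x6 % 2 = y % 2) :
    [bch x1, bch x2, bch x3, bch x4, bch x5, bch x6] = sextetBits y := by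
  unfold sextetBits
  rw [bch_congr h1, bch_congr h2, bch_congr h3, bch_congr h4, bch_congr h5, bch_congr h6]

def chunks6 (s : List Char) : List (List Char) :=
  if s = [] then [] else s.take 6 :: chunks6 (s.drop 6)
  termination_by s.length
  decreasing_by
    rename_i hs
    have : s.length ≠ 0 := fun h0 => hs (List.eq_nil_of_length_eq_zero h0)
    simp [List.length_drop]; omega

lemma mapChunks : ∀ (k : Nat) (s : List Char), s.length = 6 * k →
    (List.range k).map (fun j => (s.drop (6 * j)).take 6) = chunks6 s
  | 0, s, h => by
    have : s = [] := List.eq_nil_of_length_eq_zero (by omega)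
    subst this; simp [chunks6]
  | k + 1, s, h => by
    have hne : s ≠ [] := by intro h0; subst h0; simp at h
    rw [List.range_succ_eq_map]
    rw [chunks6]
    simp only [if_neg hne, List.map_cons, Nat.mul_zero, List.drop_zero, List.map_map]
    congr 1
    have ih := mapChunks k (s.drop 6) (by simp [List.length_drop]; omega)
    rw [← ih]
    apply List.map_congr_left
    intro j _
    simp only [Function.comp]
    have e : ((s.drop 6).drop (6 * j)) = s.drop (6 * (j + 1)) := by
      rw [List.drop_drop]; congr 1; omega
    rw [e]

lemma chunksEq (s : List Char) (hmod : s.length % 6 = 0) :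
    (PySem.List.pyRange 0 ((s.length : Int)) 6).map
      (fun i => PySem.List.slice s (some i) (some (i + 6))) = chunks6 s := by
  have hk : s.length = 6 * (s.length / 6) := by omega
  rw [PySem.List.pyRange_of_pos 0 ((s.length : Int)) (by norm_num)]
  rw [List.map_map]
  have hcnt : (if (0:Int) < (s.length : Int) then (((s.length : Int) - 0 + 6 - 1) / 6).toNat else 0)
      = s.length / 6 := by
    split_ifs with hpos
    · have h1 : ((s.length : Int) - 0 + 6 - 1) = (((s.length + 5 : Nat)) : Int) := by push_cast; ring
      rw [h1, show ((6:Int)) = (((6:Nat)) : Int) from by norm_num, ← Int.natCast_div,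
        Int.toNat_natCast]
      omega
    · omega
  rw [hcnt, ← mapChunks (s.length / 6) s hk]
  apply List.map_congr_left
  intro j _
  simp only [Function.comp]
  have e1 : (0:Int) + 6 * (j:Int) = ((6 * j : Nat) : Int) := by push_cast; ring
  rw [e1]
  have e2 : ((6 * j : Nat) : Int) + 6 = ((6 * j : Nat) : Int) + ((6 : Nat) : Int) := by norm_num
  rw [e2, PySem.List.slice_natCast_add s (6 * j) 6]

def pvEnc : List Nat → List Char
  | [] => []
  | [a] => [tbl (a/4), tbl (a%4*16)]
  | [a, b] => [tbl (a/4), tbl (a%4*16 + b/16), tbl (b%16*4)]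
  | a :: b :: c :: r =>
      tbl (a/4) :: tbl (a%4*16 + b/16) :: tbl (b%16*4 + c/64) :: tbl (c%64) :: pvEnc r

lemma fin2 (acc : Nat) (out : List Char) (ha : acc < 4) :
    pvFlush (acc, 2, out) = out ++ [tbl (acc * 16)] := by
  simp [pvFlush, tbl]
  rw [Nat.shiftLeft_eq]
  norm_num
  have h2 := andmod (acc * 16) 6
  norm_num at h2
  rw [h2]
  have h3 : acc * 16 % 64 = acc * 16 := by omega
  rw [h3]

lemma fin4 (acc : Nat) (out : List Char) (ha : acc < 16) :
    pvFlush (acc, 4, out) = out ++ [tbl (acc * 4)] := by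
  simp [pvFlush, tbl]
  rw [Nat.shiftLeft_eq]
  norm_num
  have h2 := andmod (acc * 4) 6
  norm_num at h2
  rw [h2]
  have h3 : acc * 4 % 64 = acc * 4 := by omega
  rw [h3]

theorem Bmain : ∀ (cs : List Char) (acc : Nat) (out : List Char),
    (∀ c ∈ cs, c.toNat < 256) →
    pvFlush (cs.foldl pvStep (acc, 0, out)) = out ++ pvEnc (cs.map Char.toNat)
  | [], acc, out, _ => by simp [pvFlush, pvEnc]
  | [a], acc, out, h => by
    have ha : a.toNat < 256 := h a (by simp)
    simp only [List.foldl, step0 acc out a ha]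
    rw [fin2 _ _ (by omega)]
    simp [pvEnc]
  | [a, b], acc, out, h => by
    have ha : a.toNat < 256 := h a (by simp)
    have hb : b.toNat < 256 := h b (by simp)
    simp only [List.foldl, step0 acc out a ha]
    rw [step2 _ _ b (by omega) hb]
    rw [fin4 _ _ (by omega)]
    simp [pvEnc]
  | a :: b :: c :: r, acc, out, h => by
    have ha : a.toNat < 256 := h a (by simp)
    have hb : b.toNat < 256 := h b (by simp)
    have hc : c.toNat < 256 := h c (by simp)
    have hr : ∀ x ∈ r, x.toNat < 256 := fun x hx => h x (by simp [hx])
    have ih := Bmain r 0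
      (out ++ [tbl (a.toNat/4), tbl (a.toNat%4*16 + b.toNat/16),
               tbl (b.toNat%16*4 + c.toNat/64), tbl (c.toNat%64)]) hr
    simp only [List.foldl, step0 acc out a ha]
    rw [step2 _ _ b (by omega) hb]
    rw [step4 _ _ c (by omega) hc]
    simp only [List.append_assoc, List.cons_append, List.nil_append] at ih ⊢
    rw [ih]; simp [pvEnc]

def padZ (s : List Char) : List Char :=
  if s.length % 6 ≠ 0 then s ++ List.replicate (6 - s.length % 6) '0' else s

lemma padZ_append24 (t u : List Char) (ht : t.length = 24) : padZ (t ++ u) = t ++ padZ u := by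
  unfold padZ
  have e : (t ++ u).length % 6 = u.length % 6 := by simp [List.length_append, ht]; omega
  rw [e]
  split_ifs with h0
  · rw [List.append_assoc]
  · rfl

lemma c0 : ('0' : Char) = bch 0 := rfl

lemma chunks6_nil : chunks6 [] = [] := by rw [chunks6]; simp

lemma chunks6_cons6 (c1 c2 c3 c4 c5 c6 : Char) (t : List Char) :
    chunks6 (c1::c2::c3::c4::c5::c6::t) = [c1,c2,c3,c4,c5,c6] :: chunks6 t := by
  rw [chunks6]; simp

lemma Amain : ∀ (vs : List Nat), (∀ v ∈ vs, v < 256) →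
    (chunks6 (padZ ((vs.map byteBits).flatten))).flatMap pvASextetChar = pvEnc vs
  | [], _ => by simp [padZ, chunks6_nil, pvEnc]
  | [a], h => by
    have ha : a < 256 := h a (by simp)
    simp only [List.map_cons, List.map_nil, List.flatten, List.append_nil, byteBits]
    rw [padZ]
    norm_num [List.replicate]
    rw [chunks6_cons6, chunks6_cons6, chunks6_nil]
    rw [c0]
    rw [sext_eq (y := a/4) (by first | omega | (simp only [Nat.div_div_eq_div_mul]; try omega))
      (by first | omega | (simp only [Nat.div_div_eq_div_mul]; try omega)) (by first | omega | (simp only [Nat.div_div_eq_div_mul]; try omega))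
      (by first | omega | (simp only [Nat.div_div_eq_div_mul]; try omega)) (by first | omega | (simp only [Nat.div_div_eq_div_mul]; try omega))
      (by first | omega | (simp only [Nat.div_div_eq_div_mul]; try omega))]
    rw [sext_eq (y := a%4*16) (by first | omega | (simp only [Nat.div_div_eq_div_mul]; try omega))
      (by first | omega | (simp only [Nat.div_div_eq_div_mul]; try omega)) (by first | omega | (simp only [Nat.div_div_eq_div_mul]; try omega))
      (by first | omega | (simp only [Nat.div_div_eq_div_mul]; try omega)) (by first | omega | (simp only [Nat.div_div_eq_div_mul]; try omega))
      (by first | omega | (simp only [Nat.div_div_eq_div_mul]; try omega))]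
    rw [List.flatMap_cons, List.flatMap_cons, List.flatMap_nil]
    rw [idx64 _ (by omega), idx64 _ (by omega)]
    simp [pvEnc]
  | [a, b], h => by
    have ha : a < 256 := h a (by simp)
    have hb : b < 256 := h b (by simp)
    simp only [List.map_cons, List.map_nil, List.flatten, List.append_nil, byteBits,
      List.cons_append, List.nil_append]
    rw [padZ]
    norm_num [List.replicate]
    rw [chunks6_cons6, chunks6_cons6, chunks6_cons6, chunks6_nil]
    rw [c0]
    rw [sext_eq (y := a/4) (by first | omega | (simp only [Nat.div_div_eq_div_mul]; try omega))
      (by first | omega | (simp only [Nat.div_div_eq_div_mul]; try omega)) (by first | omega | (simp only [Nat.div_div_eq_div_mul]; try omega))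
      (by first | omega | (simp only [Nat.div_div_eq_div_mul]; try omega)) (by first | omega | (simp only [Nat.div_div_eq_div_mul]; try omega))
      (by first | omega | (simp only [Nat.div_div_eq_div_mul]; try omega))]
    rw [sext_eq (y := a%4*16 + b/16) (by first | omega | (simp only [Nat.div_div_eq_div_mul]; try omega))
      (by first | omega | (simp only [Nat.div_div_eq_div_mul]; try omega)) (by first | omega | (simp only [Nat.div_div_eq_div_mul]; try omega))
      (by first | omega | (simp only [Nat.div_div_eq_div_mul]; try omega)) (by first | omega | (simp only [Nat.div_div_eq_div_mul]; try omega))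
      (by first | omega | (simp only [Nat.div_div_eq_div_mul]; try omega))]
    rw [sext_eq (y := b%16*4) (by first | omega | (simp only [Nat.div_div_eq_div_mul]; try omega))
      (by first | omega | (simp only [Nat.div_div_eq_div_mul]; try omega)) (by first | omega | (simp only [Nat.div_div_eq_div_mul]; try omega))
      (by first | omega | (simp only [Nat.div_div_eq_div_mul]; try omega)) (by first | omega | (simp only [Nat.div_div_eq_div_mul]; try omega))
      (by first | omega | (simp only [Nat.div_div_eq_div_mul]; try omega))]
    rw [List.flatMap_cons, List.flatMap_cons, List.flatMap_cons, List.flatMap_nil]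
    rw [idx64 _ (by omega), idx64 _ (by omega), idx64 _ (by omega)]
    simp [pvEnc]
  | a :: b :: c :: r, h => by
    have ha : a < 256 := h a (by simp)
    have hb : b < 256 := h b (by simp)
    have hc : c < 256 := h c (by simp)
    have hr : ∀ v ∈ r, v < 256 := fun v hv => h v (by simp [hv])
    have ih := Amain r hr
    simp only [List.map_cons, List.flatten_cons]
    rw [show byteBits a ++ (byteBits b ++ (byteBits c ++ (r.map byteBits).flatten))
        = (byteBits a ++ byteBits b ++ byteBits c) ++ (r.map byteBits).flatten by
      simp [List.append_assoc]]
    rw [padZ_append24 _ _ (by simp [byteBits])]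
    simp only [byteBits, List.cons_append, List.nil_append]
    rw [chunks6_cons6, chunks6_cons6, chunks6_cons6, chunks6_cons6]
    rw [sext_eq (y := a/4) (by first | omega | (simp only [Nat.div_div_eq_div_mul]; try omega))
      (by first | omega | (simp only [Nat.div_div_eq_div_mul]; try omega)) (by first | omega | (simp only [Nat.div_div_eq_div_mul]; try omega))
      (by first | omega | (simp only [Nat.div_div_eq_div_mul]; try omega)) (by first | omega | (simp only [Nat.div_div_eq_div_mul]; try omega))
      (by first | omega | (simp only [Nat.div_div_eq_div_mul]; try omega))]
    rw [sext_eq (y := a%4*16 + b/16) (by first | omega | (simp only [Nat.div_div_eq_div_mul]; try omega))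
      (by first | omega | (simp only [Nat.div_div_eq_div_mul]; try omega)) (by first | omega | (simp only [Nat.div_div_eq_div_mul]; try omega))
      (by first | omega | (simp only [Nat.div_div_eq_div_mul]; try omega)) (by first | omega | (simp only [Nat.div_div_eq_div_mul]; try omega))
      (by first | omega | (simp only [Nat.div_div_eq_div_mul]; try omega))]
    rw [sext_eq (y := b%16*4 + c/64) (by first | omega | (simp only [Nat.div_div_eq_div_mul]; try omega))
      (by first | omega | (simp only [Nat.div_div_eq_div_mul]; try omega)) (by first | omega | (simp only [Nat.div_div_eq_div_mul]; try omega))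
      (by first | omega | (simp only [Nat.div_div_eq_div_mul]; try omega)) (by first | omega | (simp only [Nat.div_div_eq_div_mul]; try omega))
      (by first | omega | (simp only [Nat.div_div_eq_div_mul]; try omega))]
    rw [sext_eq (y := c%64) (by first | omega | (simp only [Nat.div_div_eq_div_mul]; try omega))
      (by first | omega | (simp only [Nat.div_div_eq_div_mul]; try omega)) (by first | omega | (simp only [Nat.div_div_eq_div_mul]; try omega))
      (by first | omega | (simp only [Nat.div_div_eq_div_mul]; try omega)) (by first | omega | (simp only [Nat.div_div_eq_div_mul]; try omega))
      (by first | omega | (simp only [Nat.div_div_eq_div_mul]; try omega))]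
    rw [List.flatMap_cons, List.flatMap_cons, List.flatMap_cons, List.flatMap_cons]
    rw [idx64 _ (by omega), idx64 _ (by omega), idx64 _ (by omega), idx64 _ (by omega)]
    rw [ih]
    simp [pvEnc]

lemma join_flat (ps : List (List Char)) : PySem.Chars.join [] ps = ps.flatten := by
  induction ps with
  | nil => rfl
  | cons h t ih =>
    cases t with
    | nil => simp [PySem.Chars.join, List.intercalate]
    | cons h2 t2 =>
      simp only [PySem.Chars.join, List.intercalate, List.intersperse] at *
      simp_all

lemma len_flat (vs : List Nat) : ((vs.map byteBits).flatten).length = 8 * vs.length := by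
  induction vs with
  | nil => simp
  | cons v t ih => simp [byteBits, ih]; omega

lemma padZ_len (s : List Char) : (padZ s).length = s.length + (6 - s.length % 6) % 6 := by
  unfold padZ
  split_ifs with h <;> simp <;> omega

lemma Atop (s : String) (hlt : ∀ c ∈ s.toList, c.toNat < 256) :
    ascii_to_b64 s = String.ofList (pvEnc (s.toList.map Char.toNat)
      ++ List.replicate ((3 - s.toList.length % 3) % 3) '=') := by
  have hmapbyte : s.toList.map pvAByte = (s.toList.map Char.toNat).map byteBits := by
    rw [List.map_map]
    exact List.map_congr_left (fun c hc => byte_eq c (hlt c hc))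
  have hpadZ : ∀ t : List Char,
      (if t.length % 6 ≠ 0 then t ++ List.replicate (6 - t.length % 6) '0' else t) = padZ t :=
    fun _ => rfl
  unfold ascii_to_b64
  simp only [hmapbyte, join_flat, hpadZ]
  set vs := s.toList.map Char.toNat with hvs
  set J := (vs.map byteBits).flatten with hJ
  have hJlen : J.length = 8 * vs.length := len_flat vs
  have hmod : (padZ J).length % 6 = 0 := by rw [padZ_len]; omega
  rw [chunksEq (padZ J) hmod]
  rw [PySem.List.foldl_append_eq_flatMap pvASextetChar (chunks6 (padZ J)) []]
  rw [List.nil_append]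
  rw [Amain vs (by intro v hv; simp only [hvs] at hv; obtain ⟨c, hc, rfl⟩ := List.mem_map.mp hv; exact hlt c hc)]
  have hol : (padZ J).length / 8 = vs.length := by rw [padZ_len]; omega
  rw [hol]
  have : vs.length = s.toList.length := by simp [hvs]
  rw [this]

lemma Btop (s : String) (hlt : ∀ c ∈ s.toList, c.toNat < 256) :
    ascii_to_b64_alt s = String.ofList (pvEnc (s.toList.map Char.toNat)
      ++ List.replicate ((3 - s.toList.length % 3) % 3) '=') := by
  have h1 := Bmain s.toList 0 [] hlt
  unfold ascii_to_b64_alt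
  simp only [h1, List.nil_append]

-- ===== VERDICT (by name: the statement is the Claim_ definition above) =====
theorem ascii_to_b64_spec : Claim_equal_ascii_to_b64 := by
  intro s hdom
  unfold Spec_ascii_to_b64
  have hlt : ∀ c ∈ s.toList, c.toNat < 256 := by
    intro c hc
    unfold Dom_ascii_to_b64 pvDomStr at hdom
    have h2 := List.all_eq_true.mp hdom c hc
    simp [pvDomChar] at h2
    omega
  rw [Atop s hlt, Btop s hlt]
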